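-- pv_equiv track=rewrite | github.com/alonr619/Multi-Armed-Bandit-Evaluation-Lattice | analysis/commitment_analysis.py | commitment_round
-- ===== SOURCE A (Python) =====
-- CONSECUTIVE_THRESHOLD = 5  # minimum streak length to qualify as "committed"
--
-- def commitment_round(arms: list[int]) -> tuple[int | None, int | None]:
--     """
--     Return (first_commitment_round, committed_arm).
--     Commitment = first round t such that arms[t:t+CONSECUTIVE_THRESHOLD] are all the same,
--     AND that arm continues to be the most-pulled arm for the remainder of the game.
--     Returns (None, None) if no such commitment found.
--     Round numbering starts at 1.
--     """
--     n = len(arms)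
--     for t in range(n - CONSECUTIVE_THRESHOLD + 1):
--         streak_arm = arms[t]
--         if all(a == streak_arm for a in arms[t : t + CONSECUTIVE_THRESHOLD]):
--             # check that this arm dominates the remainder
--             remainder = arms[t:]
--             if remainder.count(streak_arm) / len(remainder) >= 0.75:
--                 return t + 1, streak_arm  # 1-indexed round
--     return None, None
-- ===== SOURCE B (Python) =====
-- CONSECUTIVE_THRESHOLD = 5  # minimum streak length to qualify as "committed"
--
-- def commitment_round(arms: list[int]) -> tuple[int | None, int | None]:
--     n = len(arms)
--     # cnt[t] = arms[t:].count(arms[t]), one backward pass with a running dict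
--     cnt = []
--     seen = {}
--     for a in reversed(arms):
--         c = seen.get(a, 0) + 1
--         seen[a] = c
--         cnt.append(c)
--     cnt.reverse()
--     # run[t] = length of the constant run starting at t, one backward pass
--     run = []
--     prev = None
--     r = 0
--     for a in reversed(arms):
--         r = r + 1 if a == prev else 1
--         prev = a
--         run.append(r)
--     run.reverse()
--     # 4*c >= 3*(n-t) is the exact integer form of arms[t:].count(a)/len(arms[t:]) >= 0.75
--     for t, (a, r, c) in enumerate(zip(arms, run, cnt)):
--         if r >= CONSECUTIVE_THRESHOLD and 4 * c >= 3 * (n - t):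
--             return t + 1, a
--     return None, None
-- ===== Notes on version B (the rewrite author's own statement) =====
-- stated objective: faster
-- what changed: A rescans a 5-element window and counts the whole suffix at every start index; B precomputes run lengths and per-arm suffix counts in two backward passes (running dict), then decides each start index in O(1) with the exact integer test 4*count >= 3*len.
import Mathlib
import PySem

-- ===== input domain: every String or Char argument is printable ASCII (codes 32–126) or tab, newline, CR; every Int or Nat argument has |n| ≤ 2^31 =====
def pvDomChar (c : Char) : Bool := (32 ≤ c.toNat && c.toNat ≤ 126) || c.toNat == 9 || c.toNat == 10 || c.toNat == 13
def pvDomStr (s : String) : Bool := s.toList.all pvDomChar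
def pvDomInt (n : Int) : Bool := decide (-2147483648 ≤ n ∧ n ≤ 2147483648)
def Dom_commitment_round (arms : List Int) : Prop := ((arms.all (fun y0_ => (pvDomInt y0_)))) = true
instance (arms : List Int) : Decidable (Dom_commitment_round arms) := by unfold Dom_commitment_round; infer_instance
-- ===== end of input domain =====

-- B replaces A's quadratic scan (a 5-window check plus a full suffix count per start index)
-- by three linear passes: suffix counts via a running dict, run lengths, then an O(1) check per index.

-- ===== PORT A =====
-- the loop body of A, over the remaining list of t-values from range(n - 5 + 1)
def pvLoopA (arms : List Int) : List Int → Option Int × Option Int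
  | [] => (none, none)
  | t :: rest =>
    let streak := PySem.List.pyGetD arms t 0   -- arms[t]; t is always in range here
    if (PySem.List.slice arms (some t) (some (t + 5))).all (fun a => a == streak) then
      let remainder := PySem.List.slice arms (some t) none
      -- `remainder.count(streak) / len(remainder) >= 0.75` ported exactly as 3*len ≤ 4*count:
      -- 0.75 is a double and |c/l - 3/4| ≥ 1/(4l) > ulp(0.75)/2 for l ≤ 2^31, so the correctly
      -- rounded float quotient is ≥ 0.75 iff the rational quotient is.
      if 3 * (PySem.List.len remainder) ≤ 4 * (PySem.List.count remainder streak : Int) then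
        (some (t + 1), some streak)
      else pvLoopA arms rest
    else pvLoopA arms rest

def commitment_round (arms : List Int) : Option Int × Option Int :=
  pvLoopA arms (PySem.List.pyRange 0 (PySem.List.len arms - 5 + 1) 1)

-- ===== PORT B =====
-- backward pass with a running dict; Python appends then reverses, consing builds the same list
def pvCntB (arms : List Int) : List Int :=
  (arms.reverse.foldl
    (fun (st : PySem.Dict Int Int × List Int) a =>
      let c := st.1.getD a 0 + 1
      (st.1.insert a c, c :: st.2))
    (PySem.Dict.empty, [])).2

-- backward pass carrying (prev, r); Python appends then reverses, consing builds the same list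
def pvRunB (arms : List Int) : List Int :=
  (arms.reverse.foldl
    (fun (st : Option Int × Int × List Int) a =>
      let r := if st.1 == some a then st.2.1 + 1 else 1
      (some a, r, r :: st.2.2))
    ((none : Option Int), (0 : Int), ([] : List Int))).2.2

-- the final `for t, (a, r, c) in enumerate(zip(arms, run, cnt))` loop
def pvScanB (n : Int) : Int → List (Int × Int × Int) → Option Int × Option Int
  | _, [] => (none, none)
  | t, (a, r, c) :: rest =>
    if 5 ≤ r ∧ 3 * (n - t) ≤ 4 * c then (some (t + 1), some a)
    else pvScanB n (t + 1) rest

def commitment_round_alt (arms : List Int) : Option Int × Option Int :=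
  let n := PySem.List.len arms
  pvScanB n 0 (arms.zip ((pvRunB arms).zip (pvCntB arms)))

-- ===== PRECONDITION & SPEC =====
def Spec_commitment_round (arms : List Int) (out : Option Int × Option Int) : Prop := out = commitment_round_alt arms
instance (arms : List Int) (out : Option Int × Option Int) : Decidable (Spec_commitment_round arms out) := by unfold Spec_commitment_round; infer_instance

-- ===== CLAIM (what is proved, stated in full; the proofs are below) =====
def Claim_equal_commitment_round : Prop := ∀ (arms : List Int), Dom_commitment_round arms → Spec_commitment_round arms (commitment_round arms)

-- ===== LEMMAS AND PROOFS =====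

-- length of the constant run of value a at the head of l
def runFrom (a : Int) : List Int → Int
  | [] => 0
  | b :: l => if b = a then 1 + runFrom a l else 0

def specRun : List Int → List Int
  | [] => []
  | a :: l => (1 + runFrom a l) :: specRun l

def specCnt : List Int → List Int
  | [] => []
  | a :: l => ((a :: l).count a : Int) :: specCnt l

def headRun : List Int → Int
  | [] => 0
  | a :: l => 1 + runFrom a l

-- structural form of B's final scan
def gB : List Int → Option Int × Option Int
  | [] => (none, none)
  | a :: l =>
    if 5 ≤ 1 + runFrom a l ∧ 3 * ((a :: l).length : Int) ≤ 4 * ((a :: l).count a : Int)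
    then (some 1, some a)
    else ((gB l).1.map (· + 1), (gB l).2)

-- structural form of A's loop
def gA : List Int → Option Int × Option Int
  | [] => (none, none)
  | a :: l =>
    if (((a :: l).take 5).all (fun x => x == a) ∧ 5 ≤ (a :: l).length) ∧
        3 * ((a :: l).length : Int) ≤ 4 * ((a :: l).count a : Int)
    then (some 1, some a)
    else ((gA l).1.map (· + 1), (gA l).2)

theorem runFrom_nonneg (a : Int) (l : List Int) : 0 ≤ runFrom a l := by
  induction l with
  | nil => simp [runFrom]
  | cons b l ih => simp only [runFrom]; split <;> omega

theorem take_all_iff (l : List Int) (k : Nat) (a : Int) :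
    ((l.take k).all (fun x => x == a) = true ∧ k ≤ l.length) ↔ (k : Int) ≤ runFrom a l := by
  induction l generalizing k with
  | nil =>
    cases k with
    | zero => simp [runFrom]
    | succ k => simp [runFrom]
  | cons b l ih =>
    cases k with
    | zero => simp [runFrom_nonneg]
    | succ k =>
      simp only [List.take_succ_cons, List.all_cons, runFrom, Bool.and_eq_true, beq_iff_eq,
        List.length_cons]
      by_cases hba : b = a
      · subst hba
        rw [if_pos rfl]
        constructor
        · rintro ⟨⟨-, h1⟩, h2⟩
          have := (ih k).mp ⟨h1, by omega⟩; push_cast at *; omega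
        · intro h
          have : (k : Int) ≤ runFrom b l := by omega
          have := (ih k).mpr this
          exact ⟨⟨rfl, this.1⟩, by omega⟩
      · rw [if_neg hba]
        constructor
        · rintro ⟨⟨h, -⟩, -⟩; exact absurd h hba
        · intro h; omega

theorem cnt_fold_fst (ys : List Int) (d : PySem.Dict Int Int) (acc : List Int) :
    (ys.foldl (fun (st : PySem.Dict Int Int × List Int) a =>
        let c := st.1.getD a 0 + 1
        (st.1.insert a c, c :: st.2)) (d, acc)).1
      = ys.foldl (fun d a => d.insert a (d.getD a 0 + 1)) d := by
  induction ys generalizing d acc with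
  | nil => rfl
  | cons y ys ih => simp only [List.foldl_cons]; exact ih _ _

theorem pvCntB_eq_specCnt (l : List Int) : pvCntB l = specCnt l := by
  induction l with
  | nil => rfl
  | cons a l ih =>
    simp only [pvCntB, specCnt, List.reverse_cons, List.foldl_append, List.foldl_cons,
      List.foldl_nil] at *
    rw [cnt_fold_fst, PySem.Dict.getD_foldl_insert_add_one, List.count_reverse, ih]
    simp [List.count_cons_self]

theorem run_fold (l : List Int) :
    l.reverse.foldl
      (fun (st : Option Int × Int × List Int) a =>
        let r := if st.1 == some a then st.2.1 + 1 else 1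
        (some a, r, r :: st.2.2))
      ((none : Option Int), (0 : Int), ([] : List Int))
    = (l.head?, headRun l, specRun l) := by
  induction l with
  | nil => rfl
  | cons a l ih =>
    simp only [List.reverse_cons, List.foldl_append, List.foldl_cons, List.foldl_nil, ih]
    cases l with
    | nil => simp [specRun, headRun, runFrom]
    | cons b l' =>
      simp only [List.head?_cons, specRun, headRun, runFrom]
      by_cases hba : b = a
      · subst hba; simp; ring
      · simp [hba]

theorem pvRunB_eq_specRun (l : List Int) : pvRunB l = specRun l := by
  unfold pvRunB
  rw [run_fold]

theorem scan_eq (s : List Int) (t : Int) :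
    pvScanB (t + s.length) t (s.zip ((specRun s).zip (specCnt s)))
      = ((gB s).1.map (t + ·), (gB s).2) := by
  induction s generalizing t with
  | nil => rfl
  | cons a s ih =>
    simp only [specRun, specCnt, List.zip_cons_cons, pvScanB, gB]
    have harith : (t + ((a :: s).length : Int)) - t = ((a :: s).length : Int) := by ring
    rw [harith]
    split
    · rfl
    · have hn : t + ((a :: s).length : Int) = (t + 1) + (s.length : Int) := by
        simp [List.length_cons]; ring
      rw [hn, ih (t + 1)]
      cases hgb : (gB s).1 <;> simp [Function.comp] <;> ring_nf

theorem alt_eq_gB (arms : List Int) : commitment_round_alt arms = gB arms := by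
  unfold commitment_round_alt
  rw [pvRunB_eq_specRun, pvCntB_eq_specCnt]
  have h := scan_eq arms 0
  simp only [zero_add] at h
  rw [show PySem.List.len arms = ((arms.length : Nat) : Int) from by simp [pysem], h,
    show Option.map (fun x : Int => x) (gB arms).1 = (gB arms).1 from by cases (gB arms).1 <;> rfl]

theorem gA_short (l : List Int) (h : l.length < 5) : gA l = (none, none) := by
  induction l with
  | nil => rfl
  | cons a l ih =>
    rw [gA, if_neg, ih (by simp at h ⊢; omega)]
    simp at h
    simp
    omega

theorem loopA_eq_gA (l pre : List Int) :
    pvLoopA (pre ++ l) (PySem.List.pyRange (pre.length : Int) ((pre.length : Int) + l.length - 4) 1)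
      = ((gA l).1.map ((pre.length : Int) + ·), (gA l).2) := by
  induction l generalizing pre with
  | nil =>
    rw [PySem.List.pyRange_one_eq_nil (by simp)]
    rfl
  | cons a rest ih =>
    by_cases h5 : (a :: rest).length < 5
    · rw [PySem.List.pyRange_one_eq_nil (by simp at h5 ⊢; omega), gA_short _ h5]
      rfl
    · push_neg at h5
      rw [PySem.List.pyRange_one_cons (by simp at h5 ⊢; omega)]
      have hget : PySem.List.pyGetD (pre ++ a :: rest) (pre.length : Int) 0 = a := by
        simp [PySem.List.pyGetD_natCast, List.getD_eq_getElem?_getD, List.getElem?_append_right]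
      have hslice : PySem.List.slice (pre ++ a :: rest) (some (pre.length : Int))
          (some ((pre.length : Int) + 5)) = (a :: rest).take 5 := by
        have : ((pre.length : Int) + 5) = ((pre.length + 5 : Nat) : Int) := by push_cast; ring
        rw [this, PySem.List.slice_natCast]
        simp
      have hrem : PySem.List.slice (pre ++ a :: rest) (some (pre.length : Int)) none
          = a :: rest := by
        rw [PySem.List.slice_from_natCast]
        simp
      rw [pvLoopA]
      simp only [hget, hslice, hrem]
      by_cases hall : ((a :: rest).take 5).all (fun x => x == a)
      · rw [if_pos hall]
        by_cases hcnt : 3 * ((a :: rest).length : Int) ≤ 4 * (((a :: rest).count a : Nat) : Int)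
        · rw [if_pos (by simpa [PySem.List.len] using hcnt)]
          rw [gA, if_pos ⟨⟨hall, h5⟩, hcnt⟩]
          rfl
        · rw [if_neg (by simpa [PySem.List.len] using hcnt)]
          have hpre : ((pre.length : Int) + 1) = (((pre ++ [a]).length : Nat) : Int) := by
            simp
          have hb : (pre.length : Int) + ((a :: rest).length : Int) - 4
              = ((pre ++ [a]).length : Int) + (rest.length : Int) - 4 := by simp; ring
          rw [hpre, hb, show pre ++ a :: rest = (pre ++ [a]) ++ rest by simp, ih]
          rw [gA, if_neg (by rintro ⟨-, h3⟩; exact hcnt h3)]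
          cases hg : (gA rest).1 <;> simp [List.length_append] <;> ring_nf
      · rw [if_neg hall]
        have hpre : ((pre.length : Int) + 1) = (((pre ++ [a]).length : Nat) : Int) := by simp
        have hb : (pre.length : Int) + ((a :: rest).length : Int) - 4
            = ((pre ++ [a]).length : Int) + (rest.length : Int) - 4 := by simp; ring
        rw [hpre, hb, show pre ++ a :: rest = (pre ++ [a]) ++ rest by simp, ih]
        rw [gA, if_neg (by rintro ⟨⟨h1, -⟩, -⟩; exact hall h1)]
        cases hg : (gA rest).1 <;> simp [List.length_append] <;> ring_nf

theorem A_eq_gA (arms : List Int) : commitment_round arms = gA arms := by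
  have h := loopA_eq_gA arms []
  simp only [List.nil_append, List.length_nil, Nat.cast_zero, zero_add] at h
  unfold commitment_round
  rw [show PySem.List.len arms - 5 + 1 = (arms.length : Int) - 4 from by simp [pysem]; ring, h,
    show Option.map (fun x : Int => x) (gA arms).1 = (gA arms).1 from by cases (gA arms).1 <;> rfl]

theorem gA_eq_gB (l : List Int) : gA l = gB l := by
  induction l with
  | nil => rfl
  | cons a l ih =>
    have hc : ((((a :: l).take 5).all (fun x => x == a)) = true ∧ 5 ≤ (a :: l).length)
        ↔ 5 ≤ 1 + runFrom a l := by
      have h := take_all_iff (a :: l) 5 a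
      simp only [runFrom, if_pos rfl] at h
      exact_mod_cast h
    rw [gA, gB, ih]
    by_cases h : 5 ≤ 1 + runFrom a l ∧ 3 * (((a :: l).length : Nat) : Int) ≤ 4 * (((a :: l).count a : Nat) : Int)
    · rw [if_pos ⟨hc.mpr h.1, h.2⟩, if_pos h]
    · rw [if_neg (fun hx => h ⟨hc.mp hx.1, hx.2⟩), if_neg h]

-- ===== VERDICT (by name: the statement is the Claim_ definition above) =====
theorem commitment_round_spec : Claim_equal_commitment_round := by
  intro arms _
  unfold Spec_commitment_round
  rw [A_eq_gA, gA_eq_gB, ← alt_eq_gB]
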